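-- pv_equiv track=rewrite | github.com/odetecangoundzi/Automatisation-du-TCO | core/exporter.py | _rows_to_sum_formula
-- ===== SOURCE A (Python) =====
-- def _rows_to_sum_formula(col: str, rows: list[int]) -> str:
--     """
--     Convertit une liste de numéros de lignes Excel en formule =SUM() avec plages.
--
--     Exemple : [3,4,5,7,8] → '=SUM(F3:F5,F7:F8)'
--     Jamais d'énumération de cellules individuelles : toujours des plages contiguës.
--     """
--     if not rows:
--         return "0"
--     sorted_rows = sorted(set(rows))
--     parts: list[str] = []
--     start = end = sorted_rows[0]
--     for r in sorted_rows[1:]: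
--         if r == end + 1:
--             end = r
--         else:
--             parts.append(f"{col}{start}:{col}{end}" if start != end else f"{col}{start}")
--             start = end = r
--     parts.append(f"{col}{start}:{col}{end}" if start != end else f"{col}{start}")
--     return "=SUM(" + ",".join(parts) + ")"
-- ===== SOURCE B (Python) =====
-- def _rows_to_sum_formula(col: str, rows: list[int]) -> str:
--     if not rows:
--         return "0"
--     s = set(rows)
--     starts = sorted(r for r in s if r - 1 not in s)
--     ends = sorted(r for r in s if r + 1 not in s)
--     parts = [f"{col}{a}:{col}{b}" if a != b else f"{col}{a}"
--              for a, b in zip(starts, ends)]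
--     return "=SUM(" + ",".join(parts) + ")"
-- ===== Notes on version B (the rewrite author's own statement) =====
-- stated objective: alternative
-- what changed: Replaces A's linear run-tracking scan over the sorted rows with a set-boundary method: range starts are the elements r with r-1 not in the set, range ends those with r+1 not in the set; the two sorted boundary lists are zipped into ranges, so no running start/end state and no consecutive-element comparison along the sorted order exists at all.
import Mathlib
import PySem

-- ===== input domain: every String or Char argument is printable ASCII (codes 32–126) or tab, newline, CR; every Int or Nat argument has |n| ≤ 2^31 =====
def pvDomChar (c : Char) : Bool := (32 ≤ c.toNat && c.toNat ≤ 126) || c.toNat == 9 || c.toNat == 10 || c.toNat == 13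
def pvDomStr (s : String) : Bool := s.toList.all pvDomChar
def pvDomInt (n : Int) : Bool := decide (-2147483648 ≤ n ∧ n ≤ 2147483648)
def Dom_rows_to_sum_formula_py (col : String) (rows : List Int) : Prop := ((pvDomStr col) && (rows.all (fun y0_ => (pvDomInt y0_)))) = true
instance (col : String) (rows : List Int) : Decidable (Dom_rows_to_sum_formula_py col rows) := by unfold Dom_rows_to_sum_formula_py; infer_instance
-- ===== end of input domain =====

-- B replaces A's linear run-tracking scan by the set-boundary method: starts are
-- elements r with r-1 not in the set, ends those with r+1 not in the set, zipped.

-- ===== PORT A =====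
-- f"{col}{start}:{col}{end}" if start != end else f"{col}{start}"
def pvFmtA (col : String) (s e : Int) : String :=
  if s ≠ e then col ++ PySem.Int.toStr s ++ ":" ++ col ++ PySem.Int.toStr e
  else col ++ PySem.Int.toStr s

def rows_to_sum_formula_py (col : String) (rows : List Int) : String :=
  if rows = [] then "0"
  else
    match PySem.List.sorted (PySem.Set.ofList rows) (fun x => x) false with
    | [] => "0"  -- unreachable: sorted(set(rows)) of nonempty rows is nonempty
    | s :: rest =>
      -- loop state: (parts, start, end)
      let st := rest.foldl
        (fun (st : List String × Int × Int) r =>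
          if r = st.2.2 + 1 then (st.1, st.2.1, r)
          else (st.1 ++ [pvFmtA col st.2.1 st.2.2], r, r))
        ([], s, s)
      "=SUM(" ++ PySem.Str.join "," (st.1 ++ [pvFmtA col st.2.1 st.2.2]) ++ ")"

-- ===== PORT B =====
def rows_to_sum_formula_py_alt (col : String) (rows : List Int) : String :=
  if rows = [] then "0"
  else
    let s := PySem.Set.ofList rows
    let starts := PySem.List.sorted (s.filter (fun r => !(PySem.Set.contains s (r - 1)))) (fun x => x) false
    let ends := PySem.List.sorted (s.filter (fun r => !(PySem.Set.contains s (r + 1)))) (fun x => x) false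
    let parts := (starts.zip ends).map (fun p =>
      if p.1 ≠ p.2 then col ++ PySem.Int.toStr p.1 ++ ":" ++ col ++ PySem.Int.toStr p.2
      else col ++ PySem.Int.toStr p.1)
    "=SUM(" ++ PySem.Str.join "," parts ++ ")"

-- ===== PRECONDITION & SPEC =====
def Spec_rows_to_sum_formula_py (col : String) (rows : List Int) (out : String) : Prop := out = rows_to_sum_formula_py_alt col rows
instance (col : String) (rows : List Int) (out : String) : Decidable (Spec_rows_to_sum_formula_py col rows out) := by unfold Spec_rows_to_sum_formula_py; infer_instance

-- ===== CLAIM (what is proved, stated in full; the proofs are below) =====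
def Claim_equal_rows_to_sum_formula_py : Prop := ∀ (col : String) (rows : List Int), Dom_rows_to_sum_formula_py col rows → Spec_rows_to_sum_formula_py col rows (rows_to_sum_formula_py col rows)

-- ===== LEMMAS AND PROOFS =====

-- the maximal consecutive runs (start, end) of a sorted list, current run (s, e)
def pvRuns (s e : Int) : List Int → List (Int × Int)
  | [] => [(s, e)]
  | r :: t => if r = e + 1 then pvRuns s r t else (s, e) :: pvRuns r r t

-- run starts after the current run ending at e / run ends with current end e
def pvStarts (e : Int) : List Int → List Int
  | [] => []
  | r :: t => if r = e + 1 then pvStarts r t else r :: pvStarts r t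

def pvEnds (e : Int) : List Int → List Int
  | [] => [e]
  | r :: t => if r = e + 1 then pvEnds r t else e :: pvEnds r t

-- A's loop produces exactly the formatted runs
theorem pvA_loop (col : String) (l : List Int) :
    ∀ (parts : List String) (s e : Int),
      (let st := l.foldl
        (fun (st : List String × Int × Int) r =>
          if r = st.2.2 + 1 then (st.1, st.2.1, r)
          else (st.1 ++ [pvFmtA col st.2.1 st.2.2], r, r)) (parts, s, e)
       st.1 ++ [pvFmtA col st.2.1 st.2.2])
      = parts ++ (pvRuns s e l).map (fun p => pvFmtA col p.1 p.2) := by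
  induction l with
  | nil => intro parts s e; simp [pvRuns]
  | cons r t ih =>
    intro parts s e
    simp only [List.foldl_cons, pvRuns]
    by_cases h : r = e + 1
    · subst h
      simpa using ih parts s (e + 1)
    · simp only [if_neg h]
      rw [ih (parts ++ [pvFmtA col s e]) r r]
      simp

theorem pv_map_fst_runs (l : List Int) :
    ∀ s e, (pvRuns s e l).map Prod.fst = s :: pvStarts e l := by
  induction l with
  | nil => intro s e; simp [pvRuns, pvStarts]
  | cons r t ih =>
    intro s e
    simp only [pvRuns, pvStarts]
    by_cases h : r = e + 1
    · simp only [if_pos h]; exact ih s r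
    · simp only [if_neg h, List.map_cons]
      rw [ih r r]

theorem pv_map_snd_runs (l : List Int) :
    ∀ s e, (pvRuns s e l).map Prod.snd = pvEnds e l := by
  induction l with
  | nil => intro s e; simp [pvRuns, pvEnds]
  | cons r t ih =>
    intro s e
    simp only [pvRuns, pvEnds]
    by_cases h : r = e + 1
    · simp only [if_pos h]; exact ih s r
    · simp only [if_neg h, List.map_cons]
      rw [ih r r]

-- tail part of the starts filter on a strictly increasing list
theorem pv_filter_starts (l : List Int) :
    ∀ e, (e :: l).Pairwise (· < ·) →
      l.filter (fun r => !((e :: l).contains (r - 1))) = pvStarts e l := by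
  induction l with
  | nil => intro e _; simp [pvStarts]
  | cons r t ih =>
    intro e hp
    have he : e < r := (List.pairwise_cons.mp hp).1 r (by simp)
    have hrt : ∀ x ∈ t, r < x :=
      (List.pairwise_cons.mp (List.pairwise_cons.mp hp).2).1
    simp only [List.filter_cons, pvStarts]
    have hmem : ((e :: r :: t).contains (r - 1)) = decide (r = e + 1) := by
      simp only [List.contains_eq_mem]
      by_cases h : r = e + 1
      · simp [h]
      · have h1 : ¬ (r - 1 = e) := by omega
        have h2 : ¬ (r - 1 = r) := by omega
        have h3 : r - 1 ∉ t := fun hm => absurd (hrt _ hm) (by omega)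
        simp [h, h1, h2, h3]
    have htail : t.filter (fun x => !((e :: r :: t).contains (x - 1)))
        = t.filter (fun x => !((r :: t).contains (x - 1))) := by
      apply List.filter_congr
      intro x hx
      have hrx : r < x := hrt x hx
      have : ¬ (x - 1 = e) := by omega
      simp [this]
    rw [hmem, htail, ih r (List.pairwise_cons.mp hp).2]
    by_cases h : r = e + 1
    · simp [h]
    · simp [h]

theorem pv_filter_ends (l : List Int) :
    ∀ e, (e :: l).Pairwise (· < ·) →
      (e :: l).filter (fun r => !((e :: l).contains (r + 1))) = pvEnds e l := by
  induction l with
  | nil =>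
    intro e _
    have : ¬ (e + 1 = e) := by omega
    simp [pvEnds, this]
  | cons r t ih =>
    intro e hp
    have he : e < r := (List.pairwise_cons.mp hp).1 r (by simp)
    have hrt : ∀ x ∈ t, r < x :=
      (List.pairwise_cons.mp (List.pairwise_cons.mp hp).2).1
    have hmem : ((e :: r :: t).contains (e + 1)) = decide (r = e + 1) := by
      simp only [List.contains_eq_mem]
      by_cases h : r = e + 1
      · simp [h]
      · have h1 : ¬ (e + 1 = e) := by omega
        have h2 : ¬ (e + 1 = r) := by omega
        have h3 : e + 1 ∉ t := fun hm => absurd (hrt _ hm) (by omega)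
        simp [h, h1, h2, h3]
    have htail : (r :: t).filter (fun x => !((e :: r :: t).contains (x + 1)))
        = (r :: t).filter (fun x => !((r :: t).contains (x + 1))) := by
      apply List.filter_congr
      intro x hx
      have hrx : r ≤ x := by
        rcases hx with _ | hx
        · exact le_refl r
        · exact le_of_lt (hrt x (by assumption))
      have : ¬ (x + 1 = e) := by omega
      simp [this]
    have hrec : (r :: t).filter (fun x => !((e :: r :: t).contains (x + 1))) = pvEnds r t := by
      rw [htail]; exact ih r (List.pairwise_cons.mp hp).2
    have hsplit : (e :: r :: t).filter (fun x => !((e :: r :: t).contains (x + 1)))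
        = if !((e :: r :: t).contains (e + 1)) then
            e :: (r :: t).filter (fun x => !((e :: r :: t).contains (x + 1)))
          else (r :: t).filter (fun x => !((e :: r :: t).contains (x + 1))) := List.filter_cons ..
    rw [hsplit, hrec, hmem]
    by_cases h : r = e + 1
    · simp [pvEnds, h]
    · simp [pvEnds, h]

-- sorted of a filtered set is the filter of the sorted set
theorem pv_sorted_filter (rows : List Int) (p : Int → Bool) :
    PySem.List.sorted ((PySem.Set.ofList rows).filter p) (fun x => x) false
      = (PySem.List.sorted (PySem.Set.ofList rows) (fun x => x) false).filter p := by
  apply PySem.List.sorted_eq_of_perm_of_pairwise_lt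
  · exact (PySem.List.sorted_perm _ _ _).filter p
  · exact (PySem.List.sorted_ofList_pairwise_lt rows).filter p

-- membership in the set equals membership in its sorted list
theorem pv_contains_sorted (rows : List Int) (x : Int) :
    PySem.Set.contains (PySem.Set.ofList rows) x
      = (PySem.List.sorted (PySem.Set.ofList rows) (fun x => x) false).contains x := by
  simp only [PySem.Set.contains, List.contains_eq_mem]
  congr 1
  simp only [eq_iff_iff]
  exact (PySem.List.mem_sorted _ _ _ _).symm

theorem pv_sorted_ne_nil (rows : List Int) (h : rows ≠ []) :
    PySem.List.sorted (PySem.Set.ofList rows) (fun x => x) false ≠ [] := by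
  intro hc
  rw [PySem.List.sorted_eq_nil_iff] at hc
  cases rows with
  | nil => exact h rfl
  | cons a t =>
    have : a ∈ PySem.Set.ofList (a :: t) := by
      rw [PySem.Set.mem_ofList]; simp
    rw [hc] at this
    simp at this

-- ===== VERDICT (by name: the statement is the Claim_ definition above) =====
theorem rows_to_sum_formula_py_spec : Claim_equal_rows_to_sum_formula_py := by
  intro col rows _
  unfold Spec_rows_to_sum_formula_py rows_to_sum_formula_py rows_to_sum_formula_py_alt
  by_cases h : rows = []
  · simp [h]
  · simp only [if_neg h]
    have hpred1 : (fun r => !(PySem.Set.contains (PySem.Set.ofList rows) (r - 1)))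
        = (fun r => !((PySem.List.sorted (PySem.Set.ofList rows) (fun x => x) false).contains (r - 1))) := by
      funext r; rw [pv_contains_sorted]
    have hpred2 : (fun r => !(PySem.Set.contains (PySem.Set.ofList rows) (r + 1)))
        = (fun r => !((PySem.List.sorted (PySem.Set.ofList rows) (fun x => x) false).contains (r + 1))) := by
      funext r; rw [pv_contains_sorted]
    cases hs : PySem.List.sorted (PySem.Set.ofList rows) (fun x => x) false with
    | nil => exact absurd hs (pv_sorted_ne_nil rows h)
    | cons s rest =>
      have hpw : (s :: rest).Pairwise (· < ·) := by
        rw [← hs]; exact PySem.List.sorted_ofList_pairwise_lt rows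
      have hA := pvA_loop col rest [] s s
      simp only [List.nil_append] at hA
      simp only [hA]
      -- B side: reduce the two sorted filters to filters of the sorted list
      rw [pv_sorted_filter rows _, pv_sorted_filter rows _, hpred1, hpred2, hs]
      -- starts
      have hfs : (s :: rest).filter (fun r => !((s :: rest).contains (r - 1)))
          = s :: pvStarts s rest := by
        have hkeep : ((s :: rest).contains (s - 1)) = false := by
          have hall : ∀ x ∈ rest, s < x := (List.pairwise_cons.mp hpw).1
          have h1 : ¬ (s - 1 = s) := by omega
          have h2 : s - 1 ∉ rest := fun hm => absurd (hall _ hm) (by omega)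
          simp [List.contains_eq_mem, h1, h2]
        simp only [List.filter_cons, hkeep, Bool.not_false, if_pos]
        rw [pv_filter_starts rest s hpw]
      rw [hfs, pv_filter_ends rest s hpw]
      -- zip of starts and ends is the runs list
      have hzip : (s :: pvStarts s rest).zip (pvEnds s rest)
          = pvRuns s s rest := by
        rw [← pv_map_fst_runs rest s s, ← pv_map_snd_runs rest s s]
        have := List.zip_unzip (pvRuns s s rest)
        rwa [List.unzip_eq_map] at this
      rw [hzip]
      rfl
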